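-- pv_equiv track=rewrite | github.com/TheodorRene/DailyPuzzles | create_board.py | gen_array
-- ===== SOURCE A (Python) =====
-- def gen_array(fen):
--     """" Generate array from FEN """
--
--     slash_index = [pos for pos, char in enumerate(fen) if char == '/']
--     arr = []
--     i = 0
--     for el_ in slash_index:
--         if slash_index[-1] == el_:
--             arr.append(fen[i:el_])
--             arr.append(fen[el_+1:])
--         else:
--             arr.append(fen[i:el_])
--             i = el_ + 1
--     return arr
-- ===== SOURCE B (Python) =====
-- def gen_array(fen):
--     """ Generate array from FEN """
--     if '/' not in fen:
--         return []
--     arr = []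
--     cur = []
--     for ch in fen:
--         if ch == '/':
--             arr.append(''.join(cur))
--             cur = []
--         else:
--             cur.append(ch)
--     arr.append(''.join(cur))
--     return arr
-- ===== Notes on version B (the rewrite author's own statement) =====
-- stated objective: faster
-- what changed: Replaced the two-pass strategy (collect all slash indices with enumerate, then slice the string between consecutive indices with a running start pointer and a special last-index branch) by a single streaming pass over the characters that maintains a current-segment buffer, flushing it on each slash; an up-front no-slash guard reproduces A's behaviour of returning an empty list when the string contains no slash.
import Mathlib
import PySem

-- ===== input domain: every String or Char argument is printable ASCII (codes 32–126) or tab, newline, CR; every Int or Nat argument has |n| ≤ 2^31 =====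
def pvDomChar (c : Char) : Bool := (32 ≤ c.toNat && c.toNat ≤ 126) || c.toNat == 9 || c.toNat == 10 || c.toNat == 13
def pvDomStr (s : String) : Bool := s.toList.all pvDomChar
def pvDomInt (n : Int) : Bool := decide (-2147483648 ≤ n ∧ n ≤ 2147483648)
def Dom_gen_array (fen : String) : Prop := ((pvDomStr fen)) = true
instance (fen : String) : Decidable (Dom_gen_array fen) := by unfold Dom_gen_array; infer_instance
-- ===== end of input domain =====

-- B replaces A's two-pass "collect slash indices, then slice between them" by a single
-- streaming pass with a current-segment buffer (measured constant-factor faster); same values everywhere.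


-- ===== PORT A =====
-- slices are taken at the char-list level and joined to Strings at the end (exact: a
-- Python string slice is the corresponding slice of its character sequence)
def gen_array (fen : String) : List String :=
  let cs := fen.toList
  let slash_index : List Int :=
    ((PySem.List.enumerate cs 0).filter (fun p => p.2 == '/')).map (fun p => p.1)
  let st := slash_index.foldl
    (fun (st : List (List Char) × Int) el =>
      if PySem.List.pyGet? slash_index (-1) == some el then
        (st.1 ++ [PySem.List.slice cs (some st.2) (some el),
                  PySem.List.slice cs (some (el + 1)) none], st.2)
      else
        (st.1 ++ [PySem.List.slice cs (some st.2) (some el)], el + 1))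
    ([], 0)
  st.1.map String.ofList

-- ===== PORT B =====
def gen_array_alt (fen : String) : List String :=
  if !PySem.Str.isIn "/" fen then []
  else
    let st := fen.toList.foldl
      (fun (st : List String × List Char) ch =>
        if ch == '/' then (st.1 ++ [String.ofList st.2], [])
        else (st.1, st.2 ++ [ch]))
      ([], [])
    st.1 ++ [String.ofList st.2]

-- ===== PRECONDITION & SPEC =====
def Spec_gen_array (fen : String) (out : List String) : Prop := out = gen_array_alt fen
instance (fen : String) (out : List String) : Decidable (Spec_gen_array fen out) := by unfold Spec_gen_array; infer_instance

-- ===== CLAIM (what is proved, stated in full; the proofs are below) =====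
def Claim_equal_gen_array : Prop := ∀ (fen : String), Dom_gen_array fen → Spec_gen_array fen (gen_array fen)

-- ===== LEMMAS AND PROOFS =====

-- positions of '/' in a char list, as Nats
def natPos : List Char → List Nat
  | [] => []
  | c :: t => (if c = '/' then [0] else []) ++ (natPos t).map (· + 1)

-- the pure structural splitter both ports are reduced to
def splitSl : List Char → List (List Char)
  | [] => [[]]
  | c :: t =>
    if c = '/' then [] :: splitSl t
    else
      match splitSl t with
      | [] => [[c]]
      | p :: ps => (c :: p) :: ps

theorem splitSl_ne_nil (cs : List Char) : splitSl cs ≠ [] := by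
  induction cs with
  | nil => simp [splitSl]
  | cons c t ih =>
    simp only [splitSl]
    split
    · simp
    · cases h : splitSl t <;> simp

theorem natPos_eq_nil_iff (cs : List Char) : natPos cs = [] ↔ '/' ∉ cs := by
  induction cs with
  | nil => simp [natPos]
  | cons c t ih =>
    simp only [natPos, List.append_eq_nil_iff, List.map_eq_nil_iff, List.mem_cons]
    constructor
    · rintro ⟨h1, h2⟩ (rfl | hm)
      · simp at h1
      · exact (ih.mp h2) hm
    · intro h
      refine ⟨?_, ih.mpr (fun hm => h (Or.inr hm))⟩
      have : c ≠ '/' := fun hc => h (Or.inl hc.symm)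
      simp [this]

theorem drop_shift (a b : List Char) (j : Nat) :
    (a ++ '/' :: b).drop (j + (a.length + 1)) = b.drop j := by
  simp [List.drop_append]
  rw [List.drop_eq_nil_of_le (by omega), show j + (a.length + 1) - a.length = j + 1 by omega]
  simp

-- no-slash prefix decomposition of the positions list
theorem natPos_decomp (a b : List Char) (ha : '/' ∉ a) :
    natPos (a ++ '/' :: b) = a.length :: (natPos b).map (· + (a.length + 1)) := by
  induction a with
  | nil => simp [natPos]
  | cons c t ih =>
    have hc : c ≠ '/' := fun h => ha (by simp [h])
    have ht : '/' ∉ t := fun h => ha (by simp [h])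
    simp only [List.cons_append, natPos, hc, ih ht]
    simp [List.map_map]

theorem splitSl_no_slash (b : List Char) (hb : '/' ∉ b) : splitSl b = [b] := by
  induction b with
  | nil => simp [splitSl]
  | cons c t ih =>
    have hc : c ≠ '/' := fun h => hb (by simp [h])
    have ht : '/' ∉ t := fun h => hb (by simp [h])
    simp [splitSl, hc, ih ht]

theorem splitSl_decomp (a b : List Char) (ha : '/' ∉ a) :
    splitSl (a ++ '/' :: b) = a :: splitSl b := by
  induction a with
  | nil => simp [splitSl]
  | cons c t ih =>
    have hc : c ≠ '/' := fun h => ha (by simp [h])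
    have ht : '/' ∉ t := fun h => ha (by simp [h])
    simp [splitSl, hc, ih ht]

-- the body of A's loop at the Nat level (L = the last slash position of the whole list)
def bodyN (cs : List Char) (L : Nat) (st : List (List Char) × Nat) (q : Nat) :
    List (List Char) × Nat :=
  if L = q then (st.1 ++ [(cs.drop st.2).take (q - st.2), cs.drop (q + 1)], st.2)
  else (st.1 ++ [(cs.drop st.2).take (q - st.2)], q + 1)

theorem bodyN_fold_prefix (cs : List Char) (L : Nat) (S : List Nat) :
    ∀ (arr : List (List Char)) (i : Nat),
      S.foldl (bodyN cs L) (arr, i) =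
        (arr ++ (S.foldl (bodyN cs L) ([], i)).1, (S.foldl (bodyN cs L) ([], i)).2) := by
  induction S with
  | nil => simp
  | cons q S ih =>
    intro arr i
    simp only [List.foldl_cons]
    by_cases h : L = q
    · rw [bodyN, bodyN, if_pos h, if_pos h, ih, ih (([] : List (List Char)) ++ _)]
      simp
    · rw [bodyN, bodyN, if_neg h, if_neg h, ih, ih (([] : List (List Char)) ++ _)]
      simp

-- shifting the fold from the whole string to the suffix after the first slash
theorem bodyN_fold_shift (a b : List Char) (Lb : Nat) (S : List Nat) :
    ∀ (arr : List (List Char)) (i : Nat),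
      (S.map (· + (a.length + 1))).foldl (bodyN (a ++ '/' :: b) (Lb + (a.length + 1)))
          (arr, i + (a.length + 1)) =
        ((S.foldl (bodyN b Lb) (arr, i)).1,
          (S.foldl (bodyN b Lb) (arr, i)).2 + (a.length + 1)) := by
  induction S with
  | nil => intro arr i; simp
  | cons q S ih =>
    intro arr i
    simp only [List.map_cons, List.foldl_cons]
    by_cases h : Lb = q
    · rw [bodyN, bodyN, if_pos (by omega : Lb + (a.length + 1) = q + (a.length + 1)), if_pos h]
      simp only
      rw [drop_shift a b i,
        show q + (a.length + 1) - (i + (a.length + 1)) = q - i by omega,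
        show q + (a.length + 1) + 1 = (q + 1) + (a.length + 1) by omega,
        drop_shift a b (q + 1)]
      exact ih _ _
    · rw [bodyN, bodyN, if_neg (by omega), if_neg h]
      simp only
      rw [drop_shift a b i,
        show q + (a.length + 1) - (i + (a.length + 1)) = q - i by omega,
        show q + (a.length + 1) + 1 = (q + 1) + (a.length + 1) by omega]
      exact ih _ _

theorem first_slash_decomp (cs : List Char) (h : '/' ∈ cs) :
    ∃ a b, '/' ∉ a ∧ cs = a ++ '/' :: b := by
  induction cs with
  | nil => simp at h
  | cons c t ih =>
    by_cases hc : c = '/'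
    · exact ⟨[], t, by simp, by simp [hc]⟩
    · have ht : '/' ∈ t := by
        rcases List.mem_cons.mp h with h1 | h1
        · exact absurd h1.symm hc
        · exact h1
      obtain ⟨a, b, ha, rfl⟩ := ih ht
      refine ⟨c :: a, b, ?_, by simp⟩
      intro hm
      rcases List.mem_cons.mp hm with h1 | h1
      · exact hc h1.symm
      · exact ha h1

-- the Nat-level fold computes the splitter
theorem AF_main : ∀ (n : Nat) (cs : List Char), cs.length ≤ n →
    ∀ L, (natPos cs).getLast? = some L →
    ((natPos cs).foldl (bodyN cs L) ([], 0)).1 = splitSl cs := by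
  intro n
  induction n with
  | zero =>
    intro cs hlen L hL
    have : cs = [] := List.eq_nil_of_length_eq_zero (by omega)
    subst this
    simp [natPos] at hL
  | succ n ih =>
    intro cs hlen L hL
    have hne : natPos cs ≠ [] := by intro h; rw [h] at hL; simp at hL
    have hmem : '/' ∈ cs := by
      by_contra h
      exact hne ((natPos_eq_nil_iff cs).mpr h)
    obtain ⟨a, b, ha, rfl⟩ := first_slash_decomp cs hmem
    have hlenb : b.length ≤ n := by
      simp [List.length_append] at hlen; omega
    rw [natPos_decomp a b ha] at hL ⊢
    rw [splitSl_decomp a b ha]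
    cases hb : natPos b with
    | nil =>
      rw [hb] at hL
      simp only [List.map_nil, List.getLast?_singleton, Option.some.injEq] at hL
      subst hL
      simp only [List.map_nil, List.foldl_cons, List.foldl_nil]
      rw [bodyN, if_pos rfl]
      simp only [List.drop_zero, Nat.sub_zero]
      rw [List.take_left, show a.length + 1 = 0 + (a.length + 1) by omega, drop_shift a b 0]
      rw [splitSl_no_slash b ((natPos_eq_nil_iff b).mp hb)]
      simp
    | cons r rs =>
      have hbne : natPos b ≠ [] := by rw [hb]; simp
      obtain ⟨Lb, hLb⟩ : ∃ x, (natPos b).getLast? = some x := by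
        rw [← Option.isSome_iff_exists, List.getLast?_isSome]; exact hbne
      have hmapne : (natPos b).map (· + (a.length + 1)) ≠ [] := by
        simp [hbne]
      have hLeq : L = Lb + (a.length + 1) := by
        have h1 : ((a.length :: (natPos b).map (· + (a.length + 1))).getLast?) =
            ((natPos b).map (· + (a.length + 1))).getLast? := by
          cases hm : (natPos b).map (· + (a.length + 1)) with
          | nil => exact absurd hm hmapne
          | cons y t => simp [List.getLast?_cons_cons]
        rw [h1, List.getLast?_map, hLb] at hL
        simpa using hL.symm
      subst hLeq
      simp only [List.foldl_cons]
      rw [bodyN, if_neg (by omega)]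
      simp only [List.drop_zero, Nat.sub_zero]
      rw [List.take_left]
      have hshift := bodyN_fold_shift a b Lb (r :: rs) ([] ++ [a]) 0
      rw [Nat.zero_add] at hshift
      rw [hshift, bodyN_fold_prefix b Lb (r :: rs) _ 0]
      have hih := ih b hlenb Lb hLb
      rw [hb] at hih
      rw [hih]
      simp

-- slash_index equals the Nat positions, cast to Int
theorem posF_eq (cs : List Char) : ∀ s : Int,
    ((PySem.List.enumerate cs s).filter (fun p => p.2 == '/')).map (fun p => p.1) =
      (natPos cs).map (fun (n : Nat) => (n : Int) + s) := by
  induction cs with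
  | nil => intro s; simp [PySem.List.enumerate_nil, natPos]
  | cons c t ih =>
    intro s
    rw [PySem.List.enumerate_cons, List.filter_cons]
    by_cases hc : c = '/'
    · rw [if_pos (by simp [hc]), List.map_cons, ih (s + 1)]
      show ((s, c).1 :: _) = _
      rw [show natPos (c :: t) = [0] ++ (natPos t).map (· + 1) by simp [natPos, hc]]
      rw [List.map_append, List.map_map]
      simp only [List.map_cons, List.map_nil, List.singleton_append, Nat.cast_zero, zero_add]
      refine congrArg₂ _ rfl ?_
      exact List.map_congr_left (fun x _ => by simp [Function.comp]; ring)
    · rw [if_neg (by simp [hc]), ih (s + 1)]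
      rw [show natPos (c :: t) = (natPos t).map (· + 1) by simp [natPos, hc]]
      rw [List.map_map]
      exact List.map_congr_left (fun x _ => by simp [Function.comp]; ring)

theorem slash_index_eq (cs : List Char) :
    ((PySem.List.enumerate cs 0).filter (fun p => p.2 == '/')).map (fun p => p.1) =
      (natPos cs).map (fun (n : Nat) => (n : Int)) := by
  rw [posF_eq cs 0]
  exact List.map_congr_left (fun x _ => by ring)

-- bridge: A's Int-level fold equals the Nat-level fold
theorem int_fold (cs : List Char) (SI : List Int) (L : Nat)
    (hSI : PySem.List.pyGet? SI (-1) = some ((L : Nat) : Int)) :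
    ∀ (S : List Nat) (arr : List (List Char)) (i : Nat),
      (S.map (fun (n : Nat) => (n : Int))).foldl
        (fun (st : List (List Char) × Int) el =>
          if PySem.List.pyGet? SI (-1) == some el then
            (st.1 ++ [PySem.List.slice cs (some st.2) (some el),
                      PySem.List.slice cs (some (el + 1)) none], st.2)
          else
            (st.1 ++ [PySem.List.slice cs (some st.2) (some el)], el + 1))
        (arr, (i : Int)) =
      ((S.foldl (bodyN cs L) (arr, i)).1, ((S.foldl (bodyN cs L) (arr, i)).2 : Int)) := by
  intro S
  induction S with
  | nil => intro arr i; simp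
  | cons q S ih =>
    intro arr i
    rw [List.map_cons, List.foldl_cons, List.foldl_cons]
    by_cases h : L = q
    · have hc : (PySem.List.pyGet? SI (-1) == some ((q : Nat) : Int)) = true := by
        rw [hSI]; simp [h]
      simp only [hc, if_true]
      rw [bodyN, if_pos h]
      simp only
      rw [PySem.List.slice_natCast,
        show (((q : Nat) : Int) + 1) = ((q + 1 : Nat) : Int) by push_cast; ring,
        PySem.List.slice_from_natCast]
      exact ih _ _
    · have hc : (PySem.List.pyGet? SI (-1) == some ((q : Nat) : Int)) = false := by
        rw [hSI]; simp [h]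
      simp only [hc, Bool.false_eq_true, if_false]
      rw [bodyN, if_neg h]
      simp only
      rw [PySem.List.slice_natCast,
        show (((q : Nat) : Int) + 1) = ((q + 1 : Nat) : Int) by push_cast; ring]
      exact ih _ _

-- B's scanner computes the splitter (generalized over the running state)
theorem B_scan : ∀ (cs : List Char) (parts : List String) (cur : List Char)
    (pp : List Char) (ps : List (List Char)), splitSl cs = pp :: ps →
    (cs.foldl
      (fun (st : List String × List Char) ch =>
        if ch == '/' then (st.1 ++ [String.ofList st.2], [])
        else (st.1, st.2 ++ [ch]))
      (parts, cur)).1 ++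
      [String.ofList (cs.foldl
        (fun (st : List String × List Char) ch =>
          if ch == '/' then (st.1 ++ [String.ofList st.2], [])
          else (st.1, st.2 ++ [ch]))
        (parts, cur)).2] =
    parts ++ String.ofList (cur ++ pp) :: ps.map String.ofList := by
  intro cs
  induction cs with
  | nil =>
    intro parts cur pp ps h
    simp [splitSl] at h
    obtain ⟨rfl, rfl⟩ := h
    simp
  | cons ch t ih =>
    intro parts cur pp ps h
    by_cases hch : ch = '/'
    · subst hch
      simp only [splitSl, if_true] at h
      cases h
      simp only [List.foldl_cons, beq_self_eq_true, if_true]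
      cases hsp : splitSl t with
      | nil => exact absurd hsp (splitSl_ne_nil t)
      | cons p' ps' =>
        rw [ih (parts ++ [String.ofList cur]) [] p' ps' hsp]
        simp
    · have h' : splitSl (ch :: t) = match splitSl t with
        | [] => [[ch]]
        | p :: ps => (ch :: p) :: ps := by simp [splitSl, hch]
      cases hsp : splitSl t with
      | nil => exact absurd hsp (splitSl_ne_nil t)
      | cons p' ps' =>
        rw [hsp] at h'
        rw [h'] at h
        injection h with h1 h2
        have hch' : (ch == '/') = false := by simp [hch]
        simp only [List.foldl_cons, hch', Bool.false_eq_true, if_false]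
        rw [ih parts (cur ++ [ch]) p' ps' hsp, ← h1, ← h2]
        simp

theorem isIn_slash (s : String) : PySem.Str.isIn "/" s = true ↔ '/' ∈ s.toList := by
  rw [PySem.Str.isIn_iff_infix]
  show ['/'] <:+: s.toList ↔ _
  constructor
  · intro h; exact h.mem (by simp)
  · intro h
    obtain ⟨p, q, hpq⟩ := List.append_of_mem h
    rw [hpq]
    exact ⟨p, q, by simp⟩

-- ===== VERDICT (by name: the statement is the Claim_ definition above) =====
theorem gen_array_spec : Claim_equal_gen_array := by
  intro fen _
  show gen_array fen = gen_array_alt fen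
  by_cases hs : '/' ∈ fen.toList
  · -- at least one slash: both sides compute the splitter
    have hne : natPos fen.toList ≠ [] := fun h => ((natPos_eq_nil_iff _).mp h) hs
    obtain ⟨L, hL⟩ : ∃ x, (natPos fen.toList).getLast? = some x := by
      rw [← Option.isSome_iff_exists, List.getLast?_isSome]; exact hne
    obtain ⟨pp, ps, hsp⟩ : ∃ pp ps, splitSl fen.toList = pp :: ps := by
      cases h : splitSl fen.toList with
      | nil => exact absurd h (splitSl_ne_nil _)
      | cons pp ps => exact ⟨pp, ps, rfl⟩
    have hA : gen_array fen = (splitSl fen.toList).map String.ofList := by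
      unfold gen_array
      simp only [slash_index_eq]
      have hget : PySem.List.pyGet? ((natPos fen.toList).map (fun (n : Nat) => (n : Int))) (-1) =
          some ((L : Nat) : Int) := by
        rw [PySem.List.pyGet?_neg_one, List.getLast?_map, hL]; rfl
      rw [show (0 : Int) = ((0 : Nat) : Int) by simp,
        int_fold fen.toList _ L hget (natPos fen.toList) [] 0,
        AF_main (fen.toList.length) fen.toList le_rfl L hL]
    have hB : gen_array_alt fen = (splitSl fen.toList).map String.ofList := by
      unfold gen_array_alt
      have hin : PySem.Str.isIn "/" fen = true := (isIn_slash fen).mpr hs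
      rw [if_neg (by rw [hin]; simp)]
      simp only
      rw [B_scan fen.toList [] [] pp ps hsp, hsp]
      simp
    rw [hA, hB]
  · -- no slash: A's index list is empty, B's guard fires
    have hA : gen_array fen = [] := by
      unfold gen_array
      simp only [slash_index_eq, (natPos_eq_nil_iff _).mpr hs]
      simp
    have hB : gen_array_alt fen = [] := by
      unfold gen_array_alt
      have hin : PySem.Str.isIn "/" fen = false := by
        by_contra h
        rw [Bool.not_eq_false] at h
        exact hs ((isIn_slash fen).mp h)
      rw [if_pos (by rw [hin]; simp)]
    rw [hA, hB]
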